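-- pv_equiv track=rewrite | github.com/thice14/WINC | BE_DEV/PROJECTS/for loops/for loops exercise/for/main.py | alphabet_set
-- ===== SOURCE A (Python) =====
-- import string
--
-- def alphabet_set(countries):
--
--     alphabet_list = list(string.ascii_lowercase)
--
--     alphabet_set_list = []
--
--     for c in countries:
--         for letter in c:
--             for char in alphabet_list:
--                 if char == letter.lower():
--                     alphabet_list.remove(char)
--                     if c not in alphabet_set_list:
--                         alphabet_set_list.append(c)
--                 continue
--             continue
--         continue
--     return alphabet_set_list
-- ===== SOURCE B (Python) =====
-- import string
--
-- def alphabet_set(countries):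
--     used = set()
--     result = []
--     for c in countries:
--         letters = {ch for ch in c.lower() if ch in string.ascii_lowercase}
--         if letters - used and c not in result:
--             result.append(c)
--         used |= letters
--     return result
-- ===== Notes on version B (the rewrite author's own statement) =====
-- stated objective: simpler
-- what changed: Replaces A's triple-nested loop with remove-during-iteration over the remaining-letters list by a single pass per country maintaining the complementary set of used letters with set difference/union; the O(1) set operations replace A's repeated 26-element list scans.
import Mathlib
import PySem

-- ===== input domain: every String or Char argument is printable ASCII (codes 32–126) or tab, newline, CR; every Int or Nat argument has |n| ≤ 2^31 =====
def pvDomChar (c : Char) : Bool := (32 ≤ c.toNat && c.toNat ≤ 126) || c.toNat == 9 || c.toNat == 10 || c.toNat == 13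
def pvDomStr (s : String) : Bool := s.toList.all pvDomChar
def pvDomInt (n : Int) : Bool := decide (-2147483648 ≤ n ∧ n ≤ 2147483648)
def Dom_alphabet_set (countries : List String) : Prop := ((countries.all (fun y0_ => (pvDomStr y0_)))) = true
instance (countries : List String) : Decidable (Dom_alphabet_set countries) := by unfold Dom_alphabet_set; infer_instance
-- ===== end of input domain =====

-- B replaces A's triple-nested loop (scan-and-remove over the remaining-letters list) by a
-- single pass per country over the complementary set of used letters (set difference/union);
-- objective: simpler.

-- ===== PORT A =====
def pvAsciiLower : List Char := "abcdefghijklmnopqrstuvwxyz".toList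

-- 'for char in alphabet_list' with 'alphabet_list.remove(char)' inside the body: CPython
-- iterates the live list by index; removing the current element shifts the suffix left while
-- the index still advances. We model that index loop exactly. 'char' is read from the list,
-- so 'list.remove(char)' never raises and equals List.erase (PySem.List.remove?_eq_some_erase).
def pvInnerA (t : Char) (c : String) (alpha : List Char) (res : List String) (i : Nat) :
    List Char × List String :=
  if h : i < alpha.length then
    let char := alpha[i]
    if char = t then
      let alpha' := alpha.erase char
      let res' := if res.contains c then res else res ++ [c]
      pvInnerA t c alpha' res' (i + 1)
    else
      pvInnerA t c alpha res (i + 1)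
  else (alpha, res)
termination_by alpha.length - i
decreasing_by
  · have : (alpha.erase alpha[i]).length = alpha.length - 1 :=
      List.length_erase_of_mem (List.getElem_mem h)
    omega
  · omega

def alphabet_set (countries : List String) : List String :=
  (countries.foldl
    (fun st c =>
      c.toList.foldl
        (fun st letter => pvInnerA (PySem.Chars.lowerChar letter) c st.1 st.2 0)
        st)
    (pvAsciiLower, ([] : List String))).2

-- ===== PORT B =====
def alphabet_set_alt (countries : List String) : List String :=
  (countries.foldl
    (fun st c =>
      let used := st.1
      let result := st.2
      let letters : PySem.Set Char :=
        PySem.Set.ofList ((PySem.Str.lower c).toList.filter (fun ch => pvAsciiLower.contains ch))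
      let result' :=
        if PySem.Set.diff letters used ≠ [] ∧ ¬ result.contains c then result ++ [c] else result
      (PySem.Set.union used letters, result'))
    (((PySem.Set.empty : PySem.Set Char)), ([] : List String))).2

-- ===== PRECONDITION & SPEC =====
def Spec_alphabet_set (countries : List String) (out : List String) : Prop := out = alphabet_set_alt countries
instance (countries : List String) (out : List String) : Decidable (Spec_alphabet_set countries out) := by unfold Spec_alphabet_set; infer_instance

-- ===== CLAIM (what is proved, stated in full; the proofs are below) =====
def Claim_equal_alphabet_set : Prop := ∀ (countries : List String), Dom_alphabet_set countries → Spec_alphabet_set countries (alphabet_set countries)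

-- ===== LEMMAS AND PROOFS =====

-- the index loop finds no match in the part of the list it still visits: it changes nothing
theorem pvInnerA_no_match (t : Char) (c : String) (alpha : List Char) (res : List String)
    (i : Nat) (hnm : t ∉ alpha.drop i) : pvInnerA t c alpha res i = (alpha, res) := by
  fun_induction pvInnerA t c alpha res i with
  | case1 alpha res i h char heq alpha' res' ih =>
      exact absurd (by rw [List.drop_eq_getElem_cons h]; exact List.mem_cons.mpr (Or.inl heq.symm)) hnm
  | case2 alpha res i h char heq ih =>
      exact ih (fun hm => hnm (by rw [List.drop_eq_getElem_cons h]; exact List.mem_cons_of_mem _ hm))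
  | case3 alpha res i h => rfl

-- the index loop on a duplicate-free list with the target still ahead: it erases the target
-- and appends c if c is new
theorem pvInnerA_match (t : Char) (c : String) (alpha : List Char) (res : List String)
    (i : Nat) (hnd : alpha.Nodup) (hm : t ∈ alpha.drop i) :
    pvInnerA t c alpha res i =
      (alpha.erase t, if res.contains c then res else res ++ [c]) := by
  fun_induction pvInnerA t c alpha res i with
  | case1 alpha res i h char heq alpha' res' ih =>
      show pvInnerA t c alpha' res' (i+1) = _
      have hteq : char = t := heq
      have hnm : t ∉ alpha'.drop (i+1) := by
        intro hx
        have : t ∈ alpha' := List.mem_of_mem_drop hx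
        rw [show alpha' = alpha.erase char from rfl, hteq] at this
        exact ((List.Nodup.mem_erase_iff hnd).mp this).1 rfl
      rw [pvInnerA_no_match t c alpha' res' (i+1) hnm]
      simp only [show alpha' = alpha.erase char from rfl,
        show res' = if res.contains c then res else res ++ [c] from rfl, hteq]
  | case2 alpha res i h char heq ih =>
      apply ih hnd
      rw [List.drop_eq_getElem_cons h] at hm
      rcases List.mem_cons.mp hm with h1 | h1
      · exact absurd h1.symm heq
      · exact h1
  | case3 alpha res i h =>
      rw [List.drop_eq_nil_of_le (le_of_not_gt h)] at hm
      exact absurd hm (List.not_mem_nil)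

-- one letter of a country, from index 0
theorem pvInnerA_step (t : Char) (c : String) (alpha : List Char) (res : List String)
    (hnd : alpha.Nodup) :
    pvInnerA t c alpha res 0 =
      if t ∈ alpha then (alpha.erase t, if res.contains c then res else res ++ [c])
      else (alpha, res) := by
  by_cases hm : t ∈ alpha
  · rw [if_pos hm]; exact pvInnerA_match t c alpha res 0 hnd (by simpa using hm)
  · rw [if_neg hm]; exact pvInnerA_no_match t c alpha res 0 (by simpa using hm)

-- appending c twice is appending it once
theorem pushNew_idem (c : String) (res : List String) :
    (if (if res.contains c then res else res ++ [c]).contains c then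
        (if res.contains c then res else res ++ [c])
      else (if res.contains c then res else res ++ [c]) ++ [c])
    = if res.contains c then res else res ++ [c] := by
  by_cases h : c ∈ res <;> simp [h]

theorem contains_false_iff {α : Type} [BEq α] [LawfulBEq α] (l : List α) (a : α) :
    (l.contains a = false) ↔ a ∉ l := by simp

-- the whole inner double loop of A over the letters of one country
theorem pvInnerA_fold (c : String) (ls : List Char) (alpha : List Char) (res : List String)
    (hnd : alpha.Nodup) :
    ls.foldl (fun st letter => pvInnerA (PySem.Chars.lowerChar letter) c st.1 st.2 0) (alpha, res)
    = (alpha.filter (fun ch => !(ls.map PySem.Chars.lowerChar).contains ch),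
       if ls.any (fun letter => alpha.contains (PySem.Chars.lowerChar letter)) then
         (if res.contains c then res else res ++ [c])
       else res) := by
  induction ls generalizing alpha res with
  | nil => simp
  | cons l ls ih =>
      rw [List.foldl_cons, pvInnerA_step _ c alpha res hnd]
      by_cases hm : PySem.Chars.lowerChar l ∈ alpha
      · rw [if_pos hm]
        rw [ih (alpha.erase (PySem.Chars.lowerChar l)) _ (List.Nodup.erase _ hnd),
          Prod.mk.injEq]
        refine ⟨?_, ?_⟩
        · -- first components
          rw [List.Nodup.erase_eq_filter hnd, List.filter_filter]
          apply List.filter_congr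
          intro ch _
          rw [Bool.eq_iff_iff]
          simp only [List.map_cons, List.contains_cons, Bool.and_eq_true, Bool.not_eq_true',
            Bool.or_eq_false_iff, contains_false_iff, bne_iff_ne, beq_eq_false_iff_ne]
          aesop
        · -- second components
          rw [pushNew_idem]
          simp [hm]
      · rw [if_neg hm]
        rw [ih alpha res hnd, Prod.mk.injEq]
        refine ⟨?_, ?_⟩
        · apply List.filter_congr
          intro ch hch
          have : ch ≠ PySem.Chars.lowerChar l := fun he => hm (he ▸ hch)
          simp [this]
        · have : (l :: ls).any (fun letter => alpha.contains (PySem.Chars.lowerChar letter))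
              = ls.any (fun letter => alpha.contains (PySem.Chars.lowerChar letter)) := by
            simp [hm]
          rw [this]

-- abbreviations for the two outer folds (proof-only helpers)
def pvFoldA (cs : List String) (st : List Char × List String) : List Char × List String :=
  cs.foldl
    (fun st c =>
      c.toList.foldl
        (fun st letter => pvInnerA (PySem.Chars.lowerChar letter) c st.1 st.2 0) st) st

def pvFoldB (cs : List String) (st : PySem.Set Char × List String) :
    PySem.Set Char × List String :=
  cs.foldl
    (fun st c =>
      let used := st.1
      let result := st.2
      let letters : PySem.Set Char :=
        PySem.Set.ofList ((PySem.Str.lower c).toList.filter (fun ch => pvAsciiLower.contains ch))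
      let result' :=
        if PySem.Set.diff letters used ≠ [] ∧ ¬ result.contains c then result ++ [c] else result
      (PySem.Set.union used letters, result')) st

theorem nodup_pvAsciiLower : pvAsciiLower.Nodup := by decide

-- the outer loops agree, given the invariant "A's remaining letters are exactly the a–z
-- letters B has not used yet, in alphabetical order"
theorem outer_invariant (cs : List String) (used : PySem.Set Char) (res : List String)
    (hnd : used.Nodup) :
    pvFoldA cs (pvAsciiLower.filter (fun ch => !used.contains ch), res)
    = (pvAsciiLower.filter (fun ch => !(pvFoldB cs (used, res)).1.contains ch),
       (pvFoldB cs (used, res)).2) := by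
  induction cs generalizing used res with
  | nil => rfl
  | cons c cs ih =>
      have hndA : (pvAsciiLower.filter (fun ch => !used.contains ch)).Nodup :=
        List.Nodup.filter _ nodup_pvAsciiLower
      rw [pvFoldA, List.foldl_cons,
        pvInnerA_fold c c.toList _ res hndA, ← pvFoldA]
      set letters : PySem.Set Char :=
        PySem.Set.ofList ((PySem.Str.lower c).toList.filter (fun ch => pvAsciiLower.contains ch))
        with hletters
      have hmem_letters : ∀ ch : Char,
          ch ∈ letters ↔ ch ∈ c.toList.map PySem.Chars.lowerChar ∧ ch ∈ pvAsciiLower := by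
        intro ch
        rw [hletters, PySem.Set.mem_ofList, List.mem_filter, PySem.Str.toList_lower]
        simp [PySem.Chars.lower]
      have hmemA : ∀ ch : Char,
          ((pvAsciiLower.filter (fun ch => !used.contains ch)).contains ch = true)
          ↔ (ch ∈ pvAsciiLower ∧ ch ∉ used) := by
        intro ch
        simp [List.mem_filter]
      have hG1 : (pvAsciiLower.filter (fun ch => !used.contains ch)).filter
            (fun ch => !(c.toList.map PySem.Chars.lowerChar).contains ch)
          = pvAsciiLower.filter (fun ch => !(PySem.Set.union used letters).contains ch) := by
        rw [List.filter_filter]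
        apply List.filter_congr
        intro ch hch
        rw [Bool.eq_iff_iff]
        have hm := hmem_letters ch
        have hu := PySem.Set.mem_union used letters ch
        simp only [PySem.Set.contains_eq_listContains, Bool.and_eq_true, Bool.not_eq_true',
          contains_false_iff]
        constructor
        · rintro ⟨h1, h2⟩ hmem
          rcases hu.mp hmem with h | h
          · exact h2 h
          · exact h1 (hm.mp h).1
        · intro hx
          exact ⟨fun hts => hx (hu.mpr (Or.inr (hm.mpr ⟨hts, hch⟩))),
                 fun hus => hx (hu.mpr (Or.inl hus))⟩
      have hG2cond : (c.toList.any (fun letter =>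
            ((pvAsciiLower.filter (fun ch => !used.contains ch)).contains
              (PySem.Chars.lowerChar letter))) = true)
          ↔ PySem.Set.diff letters used ≠ [] := by
        constructor
        · intro h hnil
          obtain ⟨l, hl, hc⟩ := List.any_eq_true.mp h
          have hm := (hmemA _).mp hc
          have : PySem.Chars.lowerChar l ∈ PySem.Set.diff letters used :=
            (PySem.Set.mem_diff letters used _).mpr
              ⟨(hmem_letters _).mpr ⟨List.mem_map_of_mem hl, hm.1⟩, hm.2⟩
          rw [hnil] at this
          exact List.not_mem_nil this
        · intro h
          by_contra hno
          apply h
          rw [List.eq_nil_iff_forall_not_mem]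
          intro ch hch
          have hd := (PySem.Set.mem_diff letters used ch).mp hch
          obtain ⟨l, hl, hlc⟩ := List.mem_map.mp ((hmem_letters ch).mp hd.1).1
          have hc : (pvAsciiLower.filter (fun ch => !used.contains ch)).contains
              (PySem.Chars.lowerChar l) = true := by
            rw [hlc]
            exact (hmemA ch).mpr ⟨((hmem_letters ch).mp hd.1).2, hd.2⟩
          exact hno (List.any_eq_true.mpr ⟨l, hl, hc⟩)
      have hG2 : (if c.toList.any (fun letter =>
            ((pvAsciiLower.filter (fun ch => !used.contains ch)).contains
              (PySem.Chars.lowerChar letter))) = true then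
            (if res.contains c then res else res ++ [c]) else res)
          = (if PySem.Set.diff letters used ≠ [] ∧ ¬ res.contains c = true
             then res ++ [c] else res) := by
        by_cases hrc : res.contains c = true
        · by_cases hc : PySem.Set.diff letters used ≠ []
          · rw [if_pos (hG2cond.mpr hc), if_pos hrc, if_neg (fun hx => hx.2 hrc)]
          · rw [if_neg (fun hx => hc (hG2cond.mp hx)), if_neg (fun hx => hc hx.1)]
        · by_cases hc : PySem.Set.diff letters used ≠ []
          · rw [if_pos (hG2cond.mpr hc), if_neg hrc, if_pos ⟨hc, hrc⟩]
          · rw [if_neg (fun hx => hc (hG2cond.mp hx)), if_neg (fun hx => hc hx.1)]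
      rw [hG1, hG2,
        ih (PySem.Set.union used letters) _ (PySem.Set.nodup_union used letters hnd)]
      rfl

-- ===== VERDICT (by name: the statement is the Claim_ definition above) =====
theorem alphabet_set_spec : Claim_equal_alphabet_set := by
  intro countries _
  show alphabet_set countries = alphabet_set_alt countries
  have hA : alphabet_set countries = (pvFoldA countries (pvAsciiLower, [])).2 := rfl
  have hB : alphabet_set_alt countries = (pvFoldB countries (PySem.Set.empty, [])).2 := rfl
  have hstart : (pvAsciiLower.filter
      (fun ch => !(PySem.Set.empty : PySem.Set Char).contains ch)) = pvAsciiLower := by decide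
  rw [hA, hB, ← hstart, outer_invariant countries PySem.Set.empty [] (by simp [PySem.Set.empty])]
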